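-- pv_equiv track=rewrite | github.com/Vitoria-Emanuely/Exercicios-Python | Prog 2/prg2-lista0a.py | leet
-- ===== SOURCE A (Python) =====
-- def leet(texto):
--     '''
--     Converte texto em leet
--     troca = {'a':'4','e':'3','g':'9','i':'1','s':'5','t':'7','o':'0'}
--     '''
--     d = {'a': '4',
--          'e': '3',
--          'g': '9',
--          'i': '1',
--          's': '5',
--          't': '7',
--          'o': '0'}
--
--     palavra = texto
--     for c, v in d.items():
--         if c.upper() in palavra:
--             palavra = palavra.replace(c.upper(), v)
--         palavra = palavra.replace(c, v)
--     return palavra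
-- ===== SOURCE B (Python) =====
-- def leet(texto):
--     mapping = {'a': '4', 'A': '4', 'e': '3', 'E': '3', 'g': '9', 'G': '9',
--                'i': '1', 'I': '1', 's': '5', 'S': '5', 't': '7', 'T': '7',
--                'o': '0', 'O': '0'}
--     return ''.join(mapping.get(ch, ch) for ch in texto)
-- ===== Notes on version B (the rewrite author's own statement) =====
-- stated objective: simpler
-- what changed: Replaces the loop of 14 repeated full-string str.replace scans (one per case of each of 7 letters) with one character-by-character pass over the text using a single 14-key substitution dict.
import Mathlib
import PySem

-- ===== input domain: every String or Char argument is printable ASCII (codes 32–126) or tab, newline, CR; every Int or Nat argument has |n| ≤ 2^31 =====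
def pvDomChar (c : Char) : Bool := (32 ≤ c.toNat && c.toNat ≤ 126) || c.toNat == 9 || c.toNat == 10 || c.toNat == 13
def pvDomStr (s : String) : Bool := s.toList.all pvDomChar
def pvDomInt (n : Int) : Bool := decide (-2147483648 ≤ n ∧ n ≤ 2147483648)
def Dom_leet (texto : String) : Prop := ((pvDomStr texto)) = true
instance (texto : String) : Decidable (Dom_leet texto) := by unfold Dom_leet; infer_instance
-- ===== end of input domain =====

-- B replaces A's loop of 14 repeated full-string replace passes with a single
-- character-by-character pass over one 14-key substitution dict (objective: simpler).

-- ===== PORT A =====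
-- the dict d of A, in insertion order
def leetDict : PySem.Dict Char Char :=
  PySem.Dict.ofList [('a','4'),('e','3'),('g','9'),('i','1'),('s','5'),('t','7'),('o','0')]

-- loop body: one iteration of `for c, v in d.items()`
def leetStep (palavra : String) (cv : Char × Char) : String :=
  let palavra1 :=
    if PySem.Str.isIn (String.singleton (PySem.Chars.upperChar cv.1)) palavra then
      PySem.Str.replace palavra (String.singleton (PySem.Chars.upperChar cv.1)) (String.singleton cv.2)
    else palavra
  PySem.Str.replace palavra1 (String.singleton cv.1) (String.singleton cv.2)

def leet (texto : String) : String :=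
  leetDict.items.foldl leetStep texto

-- ===== PORT B =====
-- single mapping with both cases of each letter
def leetMap : PySem.Dict Char Char :=
  PySem.Dict.ofList [('a','4'),('A','4'),('e','3'),('E','3'),('g','9'),('G','9'),
                     ('i','1'),('I','1'),('s','5'),('S','5'),('t','7'),('T','7'),
                     ('o','0'),('O','0')]

def leet_alt (texto : String) : String :=
  String.ofList (texto.toList.map (fun ch => leetMap.getD ch ch))

-- ===== PRECONDITION & SPEC =====
def Spec_leet (texto : String) (out : String) : Prop := out = leet_alt texto
instance (texto : String) (out : String) : Decidable (Spec_leet texto out) := by unfold Spec_leet; infer_instance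

-- ===== CLAIM (what is proved, stated in full; the proofs are below) =====
def Claim_equal_leet : Prop := ∀ (texto : String), Dom_leet texto → Spec_leet texto (leet texto)

-- ===== LEMMAS AND PROOFS =====

/-- per-character swap: what replacing a single-char pattern by a single char does -/
def swapC (a b c : Char) : Char := if c = a then b else c

theorem replace_go_single (a b : Char) :
    ∀ (l : List Char) (fuel : Nat) (acc : List Char), l.length ≤ fuel →
      PySem.Chars.replace.go [a] [b] fuel l acc = acc.reverse ++ l.map (swapC a b) := by
  intro l
  induction l with
  | nil =>
      intro fuel acc _
      cases fuel <;> simp [PySem.Chars.replace.go]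
  | cons c t ih =>
      intro fuel acc hle
      cases fuel with
      | zero => simp at hle
      | succ n =>
          by_cases h : c = a
          · have hpre : List.isPrefixOf [a] (c :: t) = true := by
              simp [List.isPrefixOf, h]
            rw [PySem.Chars.replace.go, if_pos hpre]
            have := ih n ([b] ++ acc) (by simpa using Nat.le_of_succ_le_succ hle)
            simpa [swapC, h] using this
          · have hpre : List.isPrefixOf [a] (c :: t) = false := by
              simp [List.isPrefixOf]; exact fun hh => absurd hh.symm h
            rw [PySem.Chars.replace.go, if_neg (by simp [hpre])]
            have := ih n (c :: acc) (by simpa using Nat.le_of_succ_le_succ hle)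
            simpa [swapC, h] using this

theorem replace_single (a b : Char) (l : List Char) :
    PySem.Chars.replace l [a] [b] = l.map (swapC a b) := by
  rw [PySem.Chars.replace, if_neg (by simp)]
  exact replace_go_single a b l l.length [] (le_refl _)

theorem map_swap_of_not_mem (a b : Char) (l : List Char) (h : a ∉ l) :
    l.map (swapC a b) = l := by
  conv_rhs => rw [← List.map_id l]
  refine List.map_congr_left (fun c hc => ?_)
  have : c ≠ a := fun hh => h (hh ▸ hc)
  simp [swapC, this]

/-- one loop iteration of A is a per-character map, whether or not the `in` guard fires -/
theorem step_eq_map (v a A : Char) (hA : PySem.Chars.upperChar a = A) (s : String) :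
    leetStep s (a, v) = String.ofList ((s.toList.map (swapC A v)).map (swapC a v)) := by
  unfold leetStep
  simp only [hA]
  by_cases h : PySem.Str.isIn (String.singleton A) s = true
  · rw [if_pos h]
    simp [PySem.Str.replace, replace_single, String.toList_singleton]
  · rw [if_neg h]
    have h2 : A ∉ s.toList := by
      have := (PySem.Chars.isIn_eq_false_iff [A] s.toList).mp (by
        simpa [PySem.Str.isIn, String.toList_singleton] using eq_false_of_ne_true h)
      intro hm; exact this ((List.singleton_infix_iff A s.toList).mpr hm)
    rw [map_swap_of_not_mem A v s.toList h2]
    simp [PySem.Str.replace, replace_single, String.toList_singleton]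

theorem leet_eq_map (texto : String) :
    leet texto = String.ofList
      ((((((((((((((texto.toList.map (swapC 'A' '4')).map (swapC 'a' '4')).map
        (swapC 'E' '3')).map (swapC 'e' '3')).map (swapC 'G' '9')).map (swapC 'g' '9')).map
        (swapC 'I' '1')).map (swapC 'i' '1')).map (swapC 'S' '5')).map (swapC 's' '5')).map
        (swapC 'T' '7')).map (swapC 't' '7')).map (swapC 'O' '0')).map (swapC 'o' '0')) := by
  have hitems : leetDict.items = [('a','4'),('e','3'),('g','9'),('i','1'),('s','5'),('t','7'),('o','0')] := by
    decide
  unfold leet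
  rw [hitems]
  simp only [List.foldl_cons, List.foldl_nil]
  rw [step_eq_map '4' 'a' 'A' (by decide),
      step_eq_map '3' 'e' 'E' (by decide),
      step_eq_map '9' 'g' 'G' (by decide),
      step_eq_map '1' 'i' 'I' (by decide),
      step_eq_map '5' 's' 'S' (by decide),
      step_eq_map '7' 't' 'T' (by decide),
      step_eq_map '0' 'o' 'O' (by decide)]
  simp [String.toList_ofList]

theorem pointwise (c : Char) :
    swapC 'o' '0' (swapC 'O' '0' (swapC 't' '7' (swapC 'T' '7' (swapC 's' '5' (swapC 'S' '5'
      (swapC 'i' '1' (swapC 'I' '1' (swapC 'g' '9' (swapC 'G' '9' (swapC 'e' '3' (swapC 'E' '3'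
      (swapC 'a' '4' (swapC 'A' '4' c))))))))))))) = leetMap.getD c c := by
  have h : leetMap = PySem.Dict.mk [('a','4'),('A','4'),('e','3'),('E','3'),('g','9'),('G','9'),
      ('i','1'),('I','1'),('s','5'),('S','5'),('t','7'),('T','7'),('o','0'),('O','0')] := by rfl
  rw [h]
  by_cases h1 : c = 'a'
  · subst h1; rfl
  by_cases h2 : c = 'A'
  · subst h2; rfl
  by_cases h3 : c = 'e'
  · subst h3; rfl
  by_cases h4 : c = 'E'
  · subst h4; rfl
  by_cases h5 : c = 'g'
  · subst h5; rfl
  by_cases h6 : c = 'G'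
  · subst h6; rfl
  by_cases h7 : c = 'i'
  · subst h7; rfl
  by_cases h8 : c = 'I'
  · subst h8; rfl
  by_cases h9 : c = 's'
  · subst h9; rfl
  by_cases h10 : c = 'S'
  · subst h10; rfl
  by_cases h11 : c = 't'
  · subst h11; rfl
  by_cases h12 : c = 'T'
  · subst h12; rfl
  by_cases h13 : c = 'o'
  · subst h13; rfl
  by_cases h14 : c = 'O'
  · subst h14; rfl
  simp [swapC, PySem.Dict.getD_eq_get?_getD, PySem.Dict.get?, beq_iff_eq, h1, h2, h3, h4, h5, h6, h7, h8, h9, h10, h11, h12, h13, h14, Ne.symm h1, Ne.symm h2, Ne.symm h3, Ne.symm h4, Ne.symm h5, Ne.symm h6, Ne.symm h7, Ne.symm h8, Ne.symm h9, Ne.symm h10, Ne.symm h11, Ne.symm h12, Ne.symm h13, Ne.symm h14]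

-- ===== VERDICT (by name: the statement is the Claim_ definition above) =====
set_option maxHeartbeats 400000 in
theorem leet_spec : Claim_equal_leet := by
  intro texto _
  show leet texto = leet_alt texto
  rw [leet_eq_map]
  unfold leet_alt
  refine congrArg String.ofList ?_
  simp only [List.map_map]
  refine List.map_congr_left (fun c _ => ?_)
  simp only [Function.comp_apply]
  exact pointwise c
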